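-- pv_equiv track=rewrite | github.com/VersionBear/project-aegis | utils.py | domain_matches
-- ===== SOURCE A (Python) =====
-- from typing import Iterable
--
-- def domain_matches(domain: str | None, known_domains: Iterable[str]) -> bool:
--     if not domain:
--         return False
--
--     lowered = domain.lower()
--     for candidate in known_domains:
--         if lowered == candidate or lowered.endswith(f".{candidate}"):
--             return True
--     return False
-- ===== SOURCE B (Python) =====
-- def domain_matches(domain, known_domains):
--     if not domain:
--         return False
--     known = set(known_domains)
--     lowered = domain.lower()
--     if lowered in known:
--         return True
--     for i, ch in enumerate(lowered):
--         if ch == '.' and lowered[i + 1:] in known: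
--             return True
--     return False
-- ===== Notes on version B (the rewrite author's own statement) =====
-- stated objective: alternative
-- what changed: B builds a set of the known domains once and does one pass over the domain's characters, testing the exact string and each after-dot suffix by set membership, instead of scanning every candidate with an endswith test.
import Mathlib
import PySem

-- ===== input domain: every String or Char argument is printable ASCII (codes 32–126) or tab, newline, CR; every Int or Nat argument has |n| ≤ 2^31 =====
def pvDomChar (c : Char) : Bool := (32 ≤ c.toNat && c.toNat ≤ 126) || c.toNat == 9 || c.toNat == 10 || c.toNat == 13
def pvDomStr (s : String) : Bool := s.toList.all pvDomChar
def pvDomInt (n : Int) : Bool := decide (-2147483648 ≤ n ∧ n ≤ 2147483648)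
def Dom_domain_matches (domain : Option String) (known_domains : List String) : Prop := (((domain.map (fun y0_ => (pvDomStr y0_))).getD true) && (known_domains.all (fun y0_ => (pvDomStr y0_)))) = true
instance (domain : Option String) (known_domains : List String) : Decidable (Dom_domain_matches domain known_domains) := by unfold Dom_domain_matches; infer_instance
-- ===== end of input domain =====

-- B changes the algorithm only (set of candidates + one pass over after-dot suffixes); same result as A.

-- ===== PORT A =====
-- A: guard on falsy domain, lower it, scan the candidates, match exact or '.'-suffix.
def domain_matches (domain : Option String) (known_domains : List String) : Bool :=
  match domain with
  | none => false
  | some d =>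
    if d = "" then false
    else
      let lowered := PySem.Str.lower d
      known_domains.any (fun candidate =>
        lowered == candidate || PySem.Str.endswith lowered ("." ++ candidate))

-- ===== PORT B =====
-- B: guard on falsy domain, build the set once, test the exact string, then one pass
-- over the characters testing each after-dot suffix by set membership.
def domain_matches_alt (domain : Option String) (known_domains : List String) : Bool :=
  match domain with
  | none => false
  | some d =>
    if d = "" then false
    else
      let known : PySem.Set String := PySem.Set.ofList known_domains
      let lowered := PySem.Str.lower d
      if PySem.Set.contains known lowered then true
      else
        (PySem.List.enumerate lowered.toList).any (fun p =>
          p.2 == '.' &&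
            PySem.Set.contains known
              (String.ofList (PySem.List.slice lowered.toList (some (p.1 + 1)) none)))

-- ===== PRECONDITION & SPEC =====
def Spec_domain_matches (domain : Option String) (known_domains : List String) (out : Bool) : Prop := out = domain_matches_alt domain known_domains
instance (domain : Option String) (known_domains : List String) (out : Bool) : Decidable (Spec_domain_matches domain known_domains out) := by unfold Spec_domain_matches; infer_instance

-- ===== CLAIM (what is proved, stated in full; the proofs are below) =====
def Claim_equal_domain_matches : Prop := ∀ (domain : Option String) (known_domains : List String), Dom_domain_matches domain known_domains → Spec_domain_matches domain known_domains (domain_matches domain known_domains)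

-- ===== LEMMAS AND PROOFS =====

-- 'l ends with '.'::cs'  ↔  'cs is the part after some dot at position k'
theorem endswith_dot_iff (l cs : List Char) :
    PySem.Chars.endswith l ('.' :: cs) = true ↔
      ∃ k : Nat, ∃ h : k < l.length, l[k] = '.' ∧ l.drop (k + 1) = cs := by
  rw [PySem.Chars.endswith_iff]
  constructor
  · rintro ⟨t, ht⟩
    refine ⟨t.length, ?_, ?_, ?_⟩
    · subst ht; simp
    · subst ht; simp
    · subst ht
      rw [show t.length + 1 = t.length + 1 from rfl, ← List.drop_drop,
        List.drop_left, List.drop_one, List.tail_cons]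
  · rintro ⟨k, h, hdot, hdrop⟩
    refine ⟨l.take k, ?_⟩
    have h1 : l.drop k = '.' :: cs := by
      rw [List.drop_eq_getElem_cons h, hdot, hdrop]
    calc l.take k ++ '.' :: cs = l.take k ++ l.drop k := by rw [h1]
      _ = l := List.take_append_drop k l

-- ===== VERDICT (by name: the statement is the Claim_ definition above) =====
theorem any_A_iff (l : List Char) (ks : List String) :
    (ks.any (fun c => String.ofList l == c || PySem.Str.endswith (String.ofList l) ("." ++ c))) = true ↔
      String.ofList l ∈ ks ∨ ∃ k : Nat, ∃ _ : k < l.length, l[k] = '.' ∧ String.ofList (l.drop (k + 1)) ∈ ks := by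
  simp only [List.any_eq_true, Bool.or_eq_true, beq_iff_eq, PySem.Str.endswith_eq,
    String.toList_append, String.toList_ofList]
  constructor
  · rintro ⟨c, hc, h | h⟩
    · exact Or.inl (h ▸ hc)
    · have : ("." : String).toList ++ c.toList = '.' :: c.toList := rfl
      rw [this, endswith_dot_iff] at h
      obtain ⟨k, hk, hdot, hdrop⟩ := h
      exact Or.inr ⟨k, hk, hdot, by rw [hdrop, String.ofList_toList]; exact hc⟩
  · rintro (h | ⟨k, hk, hdot, hmem⟩)
    · exact ⟨String.ofList l, h, Or.inl rfl⟩
    · refine ⟨String.ofList (l.drop (k + 1)), hmem, Or.inr ?_⟩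
      have : ("." : String).toList ++ (String.ofList (l.drop (k + 1))).toList = '.' :: (l.drop (k + 1)) := by
        simp
      rw [this, endswith_dot_iff]
      exact ⟨k, hk, hdot, rfl⟩

theorem any_B_iff (l : List Char) (ks : List String) :
    ((PySem.List.enumerate l).any (fun p =>
        p.2 == '.' && PySem.Set.contains (PySem.Set.ofList ks)
          (String.ofList (PySem.List.slice l (some (p.1 + 1)) none)))) = true ↔
      ∃ k : Nat, ∃ _ : k < l.length, l[k] = '.' ∧ String.ofList (l.drop (k + 1)) ∈ ks := by
  simp only [List.any_eq_true, Bool.and_eq_true, beq_iff_eq, PySem.Set.contains_iff,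
    PySem.Set.mem_ofList, PySem.List.mem_enumerate_iff]
  constructor
  · rintro ⟨p, ⟨k, hk, rfl⟩, hdot, hmem⟩
    refine ⟨k, hk, hdot, ?_⟩
    have : ((0 : Int) + k) + 1 = ((k + 1 : Nat) : Int) := by push_cast; ring
    rwa [this, PySem.List.slice_from_natCast] at hmem
  · rintro ⟨k, hk, hdot, hmem⟩
    refine ⟨(0 + (k : Int), l[k]), ⟨k, hk, rfl⟩, hdot, ?_⟩
    have : ((0 : Int) + k) + 1 = ((k + 1 : Nat) : Int) := by push_cast; ring
    rwa [this, PySem.List.slice_from_natCast]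

theorem main_eq (l : List Char) (ks : List String) :
    (ks.any (fun c => String.ofList l == c || PySem.Str.endswith (String.ofList l) ("." ++ c))) =
      (if PySem.Set.contains (PySem.Set.ofList ks) (String.ofList l) then true
       else (PySem.List.enumerate l).any (fun p =>
          p.2 == '.' && PySem.Set.contains (PySem.Set.ofList ks)
            (String.ofList (PySem.List.slice l (some (p.1 + 1)) none)))) := by
  by_cases hmem : String.ofList l ∈ ks
  · rw [if_pos (by rw [PySem.Set.contains_iff, PySem.Set.mem_ofList]; exact hmem)]
    exact (any_A_iff l ks).mpr (Or.inl hmem)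
  · rw [if_neg (fun h => hmem ((PySem.Set.mem_ofList _ _).mp ((PySem.Set.contains_iff _ _).mp h)))]
    rw [Bool.eq_iff_iff, any_A_iff, any_B_iff]
    constructor
    · rintro (h | h)
      · exact absurd h hmem
      · exact h
    · exact Or.inr

theorem domain_matches_spec : Claim_equal_domain_matches := by
  intro domain ks _
  unfold Spec_domain_matches
  cases domain with
  | none => rfl
  | some d =>
    by_cases hd : d = ""
    · simp [domain_matches, domain_matches_alt, hd]
    · simp only [domain_matches, domain_matches_alt, if_neg hd]
      have hL : PySem.Str.lower d = String.ofList (PySem.Str.lower d).toList :=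
        String.ofList_toList.symm
      rw [hL]
      simp only [String.toList_ofList]
      exact main_eq (PySem.Str.lower d).toList ks
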